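-- pv_equiv track=rewrite | github.com/CrapTheCoder/Competitive-Programming | CodeForces/PyPy 3/1097C | Yuhao and a Parenthesis/73550315.py | count
-- ===== SOURCE A (Python) =====
-- def count(s):
--     m = 0
--     c = 0
--
--     for i in s:
--         if i == '(': c += 1
--         if i == ')': c -= 1
--
--         m = min(m, c)
--
--     return c, m
-- ===== SOURCE B (Python) =====
-- def count(s):
--     # Bracket-matching view: every ')' cancels a pending '(' if one exists,
--     # otherwise it is an unmatched ')'. The balance is open - close, and the
--     # minimum prefix depth is exactly -(number of unmatched ')').
--     open_ = 0
--     close = 0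
--     for ch in s:
--         if ch == '(':
--             open_ += 1
--         elif ch == ')':
--             if open_:
--                 open_ -= 1
--             else:
--                 close += 1
--     return open_ - close, -close
-- ===== Notes on version B (the rewrite author's own statement) =====
-- stated objective: alternative
-- what changed: A tracks a running counter and takes a running minimum of it at every character; B runs a bracket-matching scan counting unmatched open and unmatched close parentheses (a close cancels a pending open if any), then derives the balance as open-close and the minimum prefix depth as -close, with no min operation at all.
import Mathlib
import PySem

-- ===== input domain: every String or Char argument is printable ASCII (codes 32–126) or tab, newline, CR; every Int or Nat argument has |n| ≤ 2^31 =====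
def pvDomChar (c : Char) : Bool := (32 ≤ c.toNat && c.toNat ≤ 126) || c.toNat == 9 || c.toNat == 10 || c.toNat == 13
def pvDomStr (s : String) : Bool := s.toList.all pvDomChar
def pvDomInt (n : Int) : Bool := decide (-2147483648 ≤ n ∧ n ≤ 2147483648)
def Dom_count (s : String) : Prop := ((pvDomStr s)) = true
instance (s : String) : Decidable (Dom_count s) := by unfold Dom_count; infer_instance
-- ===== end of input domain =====

-- B replaces A's running-minimum scan by a bracket-matching scan (count unmatched '(' and ')'):
-- balance = open - close and min prefix depth = -close; alternative algorithm, same cost.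

-- ===== PORT A =====
def count (s : String) : Int × Int :=
  let p := s.toList.foldl (fun (p : Int × Int) i =>
    let c := if i = '(' then p.2 + 1 else p.2
    let c := if i = ')' then c - 1 else c
    (min p.1 c, c)) (0, 0)
  (p.2, p.1)

-- ===== PORT B =====
-- state = (open_, close): unmatched '(' so far, unmatched ')' so far
def count_alt (s : String) : Int × Int :=
  let p := s.toList.foldl (fun (p : Int × Int) ch =>
    if ch = '(' then (p.1 + 1, p.2)
    else if ch = ')' then
      (if p.1 ≠ 0 then (p.1 - 1, p.2) else (p.1, p.2 + 1))
    else p) ((0 : Int), (0 : Int))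
  (p.1 - p.2, -p.2)

-- ===== PRECONDITION & SPEC =====
def Spec_count (s : String) (out : Int × Int) : Prop := out = count_alt s
instance (s : String) (out : Int × Int) : Decidable (Spec_count s out) := by unfold Spec_count; infer_instance

-- ===== CLAIM (what is proved, stated in full; the proofs are below) =====
def Claim_equal_count : Prop := ∀ (s : String), Dom_count s → Spec_count s (count s)

-- ===== LEMMAS AND PROOFS =====

-- Invariant: if B's matching state is (o, k) with o, k ≥ 0, then A's fused state is (m, c) = (-k, o - k).
theorem pv_fold_eq (l : List Char) (o k : Int) (ho : 0 ≤ o) (hk : 0 ≤ k) :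
    l.foldl (fun (p : Int × Int) i =>
      let c := if i = '(' then p.2 + 1 else p.2
      let c := if i = ')' then c - 1 else c
      (min p.1 c, c)) (-k, o - k)
    = (let q := l.foldl (fun (p : Int × Int) ch =>
        if ch = '(' then (p.1 + 1, p.2)
        else if ch = ')' then
          (if p.1 ≠ 0 then (p.1 - 1, p.2) else (p.1, p.2 + 1))
        else p) (o, k)
       ((-q.2 : Int), q.1 - q.2)) := by
  induction l generalizing o k with
  | nil => simp
  | cons x xs ih =>
    simp only [List.foldl_cons]
    by_cases h1 : x = '('
    · subst h1
      simp only [reduceIte]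
      convert ih (o + 1) k (by omega) hk using 3 <;> simp <;> omega
    · by_cases h2 : x = ')'
      · subst h2
        simp only [reduceIte]
        by_cases ho0 : o = 0
        · subst ho0
          simp only [ne_eq, not_true_eq_false, if_false]
          convert ih 0 (k + 1) le_rfl (by omega) using 3 <;> simp <;> omega
        · simp only [ne_eq, ho0, not_false_eq_true, if_true]
          convert ih (o - 1) k (by omega) hk using 3 <;> simp <;> omega
      · simp only [if_neg h1, if_neg h2]
        convert ih o k ho hk using 3 <;> simp <;> omega

-- ===== VERDICT (by name: the statement is the Claim_ definition above) =====
theorem count_spec : Claim_equal_count := by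
  intro s _
  show count s = count_alt s
  have h := pv_fold_eq s.toList 0 0 le_rfl le_rfl
  simp only [neg_zero, sub_zero] at h
  simp [count, count_alt, h]
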